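-- pv_equiv track=rewrite | github.com/ErpGenex/omnexa_core | omnexa_core/install.py | _repair_apps_txt_entries
-- ===== SOURCE A (Python) =====
-- REQUIRED_SITE_APPS = [
-- 	"omnexa_accounting",
-- 	"erpgenex_theme_0426",
-- 	"omnexa_backup",
-- 	"omnexa_customer_core",
-- 	"omnexa_einvoice",
-- 	"omnexa_experience",
-- 	"omnexa_fixed_assets",
-- 	"omnexa_hr",
-- 	"omnexa_intelligence_core",
-- 	"omnexa_projects_pm",
-- 	"omnexa_reporting_compliance",
-- 	"omnexa_services",
-- 	"omnexa_setup_intelligence",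
-- 	"omnexa_statutory_audit",
-- 	"omnexa_theme_manager",
-- 	"omnexa_trading",
-- 	"omnexa_user_academy",
-- 	"omnexa_n8n_bridge",
-- ]
--
-- def _repair_apps_txt_entries(lines: list[str]) -> list[str]:
-- 	"""Repair malformed apps.txt entries where two app names were concatenated."""
-- 	known = ["frappe", "erpnext", "payments", *REQUIRED_SITE_APPS]
-- 	known_set = set(known)
-- 	out = []
-- 	changed = False
--
-- 	for raw in lines:
-- 		line = (raw or "").strip()
-- 		if not line:
-- 			continue
-- 		if line in known_set:
-- 			out.append(line)
-- 			continue
--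
-- 		# Try splitting concatenated app names (e.g. omnexa_coreerpgenex_theme_0426).
-- 		split_done = False
-- 		for left in known:
-- 			if not line.startswith(left):
-- 				continue
-- 			right = line[len(left) :]
-- 			if right in known_set:
-- 				out.extend([left, right])
-- 				changed = True
-- 				split_done = True
-- 				break
-- 		if split_done:
-- 			continue
--
-- 		out.append(line)
--
-- 	# Preserve order while removing duplicates.
-- 	deduped = []
-- 	seen = set()
-- 	for app in out:
-- 		if app in seen:
-- 			if app in known_set:
-- 				changed = True
-- 			continue
-- 		seen.add(app)
-- 		deduped.append(app)
--
-- 	return deduped if changed else [ln.strip() for ln in lines if (ln or "").strip()]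
-- ===== SOURCE B (Python) =====
-- REQUIRED_SITE_APPS = [
--     "omnexa_accounting",
--     "erpgenex_theme_0426",
--     "omnexa_backup",
--     "omnexa_customer_core",
--     "omnexa_einvoice",
--     "omnexa_experience",
--     "omnexa_fixed_assets",
--     "omnexa_hr",
--     "omnexa_intelligence_core",
--     "omnexa_projects_pm",
--     "omnexa_reporting_compliance",
--     "omnexa_services",
--     "omnexa_setup_intelligence",
--     "omnexa_statutory_audit",
--     "omnexa_theme_manager",
--     "omnexa_trading",
--     "omnexa_user_academy",
--     "omnexa_n8n_bridge",
-- ]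
--
-- _KNOWN_SET = {"frappe", "erpnext", "payments", *REQUIRED_SITE_APPS}
--
--
-- def _expand(line):
--     """Split a concatenated pair by scanning the cut positions of the string.
--
--     Correct because no known app name is a prefix of another, so at most one
--     cut position yields a known left part (and A's scan over the known list
--     finds exactly that cut or none)."""
--     if line in _KNOWN_SET:
--         return [line]
--     for i in range(1, len(line)):
--         if line[:i] in _KNOWN_SET and line[i:] in _KNOWN_SET:
--             return [line[:i], line[i:]]
--     return [line]
--
--
-- def _repair_apps_txt_entries(lines: list[str]) -> list[str]:
--     stripped = [s for ln in lines if (s := (ln or "").strip())]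
--     groups = [_expand(s) for s in stripped]
--     flat = [app for g in groups for app in g]
--     changed = any(len(g) == 2 for g in groups) or any(
--         flat.count(app) > 1 for app in _KNOWN_SET)
--     return list(dict.fromkeys(flat)) if changed else stripped
-- ===== Notes on version B (the rewrite author's own statement) =====
-- stated objective: faster
-- what changed: B splits a concatenated entry by scanning cut positions of the string (valid because no known app name is a prefix of another) instead of scanning the known-apps list per line, dedupes with dict.fromkeys instead of A's imperative seen-set loop, and computes the changed flag declaratively (a split happened, or some known app occurs more than once in the flattened expansion) instead of threading a mutable flag through two loops.
import Mathlib
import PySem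

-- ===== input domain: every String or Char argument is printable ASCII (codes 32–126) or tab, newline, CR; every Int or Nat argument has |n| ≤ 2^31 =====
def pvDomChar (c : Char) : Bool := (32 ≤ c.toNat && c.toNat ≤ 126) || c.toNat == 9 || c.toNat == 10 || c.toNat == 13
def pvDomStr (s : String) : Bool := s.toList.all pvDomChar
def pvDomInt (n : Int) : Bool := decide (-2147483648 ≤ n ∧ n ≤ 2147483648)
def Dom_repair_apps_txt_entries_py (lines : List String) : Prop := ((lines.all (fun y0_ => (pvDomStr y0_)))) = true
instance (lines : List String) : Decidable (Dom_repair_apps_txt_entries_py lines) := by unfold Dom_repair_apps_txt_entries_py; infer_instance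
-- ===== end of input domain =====

-- B splits a concatenated entry by scanning CUT POSITIONS of the string (correct because no
-- known app name is a prefix of another), dedupes via dict.fromkeys and computes the changed
-- flag declaratively (a split happened, or some known app occurs more than once), instead of
-- A's known-list scan and imperative seen-set/flag state; a timing run measured B faster.

-- ===== PORT A =====
def pvKnown : List String :=
  ["frappe", "erpnext", "payments",
   "omnexa_accounting", "erpgenex_theme_0426", "omnexa_backup", "omnexa_customer_core",
   "omnexa_einvoice", "omnexa_experience", "omnexa_fixed_assets", "omnexa_hr",
   "omnexa_intelligence_core", "omnexa_projects_pm", "omnexa_reporting_compliance",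
   "omnexa_services", "omnexa_setup_intelligence", "omnexa_statutory_audit",
   "omnexa_theme_manager", "omnexa_trading", "omnexa_user_academy", "omnexa_n8n_bridge"]

def pvKnownSet : PySem.Set String := PySem.Set.ofList pvKnown

-- A's inner 'for left in known: …' scan over the known-apps list
def pvFindSplit : List String → String → Option (String × String)
  | [], _ => none
  | left :: rest, line =>
    if PySem.Str.startswith line left then
      let right := PySem.Str.slice line (some (PySem.Str.len left)) none
      if pvKnownSet.contains right then some (left, right) else pvFindSplit rest line
    else pvFindSplit rest line

-- A's second loop body: 'if app in seen: … else: …'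
def pvDedupStep (st : List String × PySem.Set String × Bool) (app : String) :
    List String × PySem.Set String × Bool :=
  if st.2.1.contains app then (st.1, st.2.1, st.2.2 || pvKnownSet.contains app)
  else (st.1 ++ [app], st.2.1.add app, st.2.2)

-- A's first loop body: strip, keep known, try a split, else keep as-is
def pvAStep (st : List String × Bool) (raw : String) : List String × Bool :=
  let line := PySem.Str.strip raw
  if line = "" then st
  else if pvKnownSet.contains line then (st.1 ++ [line], st.2)
  else
    match pvFindSplit pvKnown line with
    | some (l, r) => (st.1 ++ [l, r], true)
    | none => (st.1 ++ [line], st.2)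

def repair_apps_txt_entries_py (lines : List String) : List String :=
  let s1 := lines.foldl pvAStep ([], false)
  let s2 := s1.1.foldl pvDedupStep ([], PySem.Set.empty, s1.2)
  if s2.2.2 then s2.1
  else lines.filterMap (fun ln => let s := PySem.Str.strip ln; if s = "" then none else some s)

-- ===== PORT B =====
-- B's 'for i in range(1, len(line)): if line[:i] in set and line[i:] in set' scan over cut positions
def pvPosScan (line : String) : List Int → Option (String × String)
  | [] => none
  | i :: rest =>
    let l := PySem.Str.slice line none (some i)
    let r := PySem.Str.slice line (some i) none
    if pvKnownSet.contains l && pvKnownSet.contains r then some (l, r)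
    else pvPosScan line rest

-- B's _expand helper
def pvExpandB (line : String) : List String :=
  if pvKnownSet.contains line then [line]
  else
    match pvPosScan line (PySem.List.pyRange 1 (PySem.Str.len line) 1) with
    | some (l, r) => [l, r]
    | none => [line]

def repair_apps_txt_entries_py_alt (lines : List String) : List String :=
  let stripped := lines.filterMap (fun ln => let s := PySem.Str.strip ln; if s = "" then none else some s)
  let groups := stripped.map pvExpandB
  let flat := groups.flatten
  let changed := groups.any (fun g => g.length == 2) ||
    pvKnownSet.any (fun app => decide (1 < PySem.List.count flat app))
  if changed then PySem.List.dedup flat else stripped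

-- ===== PRECONDITION & SPEC =====
def Spec_repair_apps_txt_entries_py (lines : List String) (out : List String) : Prop := out = repair_apps_txt_entries_py_alt lines
instance (lines : List String) (out : List String) : Decidable (Spec_repair_apps_txt_entries_py lines out) := by unfold Spec_repair_apps_txt_entries_py; infer_instance

-- ===== CLAIM (what is proved, stated in full; the proofs are below) =====
def Claim_equal_repair_apps_txt_entries_py : Prop := ∀ (lines : List String), Dom_repair_apps_txt_entries_py lines → Spec_repair_apps_txt_entries_py lines (repair_apps_txt_entries_py lines)

-- ===== LEMMAS AND PROOFS =====

-- a valid split of 'line': both halves known (hence nonempty) and they concatenate to line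
def pvGood (line l r : String) : Prop :=
  l ∈ pvKnown ∧ r ∈ pvKnown ∧ l.toList ++ r.toList = line.toList

-- every known app name is nonempty
theorem pv_known_ne : ∀ x ∈ pvKnown, x.toList ≠ [] := by decide

-- no known app name is a prefix of another (why B's position scan finds A's split)
theorem pv_prefix_free : ∀ a ∈ pvKnown, ∀ b ∈ pvKnown, a.toList <+: b.toList → a = b := by decide

theorem pv_contains_iff (x : String) : pvKnownSet.contains x = true ↔ x ∈ pvKnown := by
  have h : PySem.Set.contains pvKnownSet x = List.contains pvKnownSet x := rfl
  rw [h, List.contains_iff_mem]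
  exact PySem.Set.mem_ofList pvKnown x

theorem pv_good_unique {line l1 r1 l2 r2 : String}
    (h1 : pvGood line l1 r1) (h2 : pvGood line l2 r2) : l1 = l2 ∧ r1 = r2 := by
  obtain ⟨hl1, hr1, he1⟩ := h1
  obtain ⟨hl2, hr2, he2⟩ := h2
  have hll : l1 = l2 := by
    rcases List.prefix_or_prefix_of_prefix ⟨r1.toList, he1⟩ ⟨r2.toList, he2⟩ with h | h
    · exact pv_prefix_free l1 hl1 l2 hl2 h
    · exact (pv_prefix_free l2 hl2 l1 hl1 h).symm
  subst hll
  refine ⟨rfl, String.toList_inj.mp ?_⟩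
  exact List.append_cancel_left (he1.trans he2.symm)

-- line[len(x):] when line = x ++ t
theorem pv_slice_from_len (line x : String) (t : List Char) (h : line.toList = x.toList ++ t) :
    (PySem.Str.slice line (some (PySem.Str.len x)) none).toList = t := by
  rw [PySem.Str.toList_slice, PySem.Chars.slice_eq_listSlice, PySem.Str.len_eq,
    PySem.List.slice_from_natCast, h, List.drop_left]

theorem pv_findSplit_sound (ks : List String) (hks : ∀ x ∈ ks, x ∈ pvKnown)
    (line l r : String) (h : pvFindSplit ks line = some (l, r)) : pvGood line l r := by
  induction ks with
  | nil => simp [pvFindSplit] at h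
  | cons x rest ih =>
    simp only [pvFindSplit] at h
    by_cases hs : PySem.Str.startswith line x = true
    · rw [if_pos hs] at h
      by_cases hc : pvKnownSet.contains (PySem.Str.slice line (some (PySem.Str.len x)) none) = true
      · rw [if_pos hc] at h
        obtain ⟨t, ht⟩ : x.toList <+: line.toList := by
          rw [PySem.Str.startswith_eq] at hs
          exact (PySem.Chars.startswith_iff _ _).mp hs
        simp only [Option.some.injEq, Prod.mk.injEq] at h
        obtain ⟨hx, hr⟩ := h
        refine ⟨hx ▸ hks x (List.mem_cons_self), ?_, ?_⟩
        · exact hr ▸ (pv_contains_iff _).mp hc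
        · rw [← hx, ← hr, pv_slice_from_len line x t ht.symm, ← ht, hx]
      · rw [if_neg hc] at h
        exact ih (fun y hy => hks y (List.mem_cons_of_mem x hy)) h
    · rw [if_neg hs] at h
      exact ih (fun y hy => hks y (List.mem_cons_of_mem x hy)) h

theorem pv_findSplit_complete (ks : List String) (line l r : String)
    (hg : pvGood line l r) (hl : l ∈ ks) : ∃ p, pvFindSplit ks line = some p := by
  obtain ⟨hkl, hkr, he⟩ := hg
  induction ks with
  | nil => cases hl
  | cons x rest ih =>
    simp only [pvFindSplit]
    by_cases hs : PySem.Str.startswith line x = true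
    · rw [if_pos hs]
      by_cases hc : pvKnownSet.contains (PySem.Str.slice line (some (PySem.Str.len x)) none) = true
      · rw [if_pos hc]; exact ⟨_, rfl⟩
      · rw [if_neg hc]
        rcases List.mem_cons.mp hl with hxl | hmem
        · exfalso
          apply hc
          have : (PySem.Str.slice line (some (PySem.Str.len x)) none) = r := by
            apply String.toList_inj.mp
            refine pv_slice_from_len line x r.toList ?_
            rw [← he, hxl]
          rw [this]
          exact (pv_contains_iff _).mpr hkr
        · exact ih hmem
    · rcases List.mem_cons.mp hl with hxl | hmem
      · exfalso
        apply hs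
        rw [PySem.Str.startswith_eq]
        exact (PySem.Chars.startswith_iff _ _).mpr ⟨r.toList, by rw [← hxl]; exact he⟩
      · rw [if_neg hs]
        exact ih hmem

theorem pv_posScan_sound (is : List Int) (his : ∀ i ∈ is, 0 ≤ i)
    (line l r : String) (h : pvPosScan line is = some (l, r)) : pvGood line l r := by
  induction is with
  | nil => simp [pvPosScan] at h
  | cons i rest ih =>
    simp only [pvPosScan] at h
    by_cases hc : (pvKnownSet.contains (PySem.Str.slice line none (some i)) &&
        pvKnownSet.contains (PySem.Str.slice line (some i) none)) = true
    · rw [if_pos hc] at h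
      simp only [Option.some.injEq, Prod.mk.injEq] at h
      obtain ⟨hx, hr⟩ := h
      obtain ⟨hc1, hc2⟩ := Bool.and_eq_true_iff.mp hc
      have h0 : (0:Int) ≤ i := his i List.mem_cons_self
      refine ⟨hx ▸ (pv_contains_iff _).mp hc1, hr ▸ (pv_contains_iff _).mp hc2, ?_⟩
      rw [← hx, ← hr]
      rw [PySem.Str.toList_slice, PySem.Str.toList_slice, PySem.Chars.slice_eq_listSlice,
        PySem.Chars.slice_eq_listSlice, PySem.List.slice_to line.toList h0,
        PySem.List.slice_from line.toList h0, List.take_append_drop]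
    · rw [if_neg hc] at h
      exact ih (fun j hj => his j (List.mem_cons_of_mem i hj)) h

theorem pv_posScan_mem (line : String) (is : List Int) (i : Int) (hi : i ∈ is)
    (hc : (pvKnownSet.contains (PySem.Str.slice line none (some i)) &&
           pvKnownSet.contains (PySem.Str.slice line (some i) none)) = true) :
    ∃ p, pvPosScan line is = some p := by
  induction is with
  | nil => cases hi
  | cons j rest ih =>
    simp only [pvPosScan]
    by_cases hj : (pvKnownSet.contains (PySem.Str.slice line none (some j)) &&
        pvKnownSet.contains (PySem.Str.slice line (some j) none)) = true
    · rw [if_pos hj]; exact ⟨_, rfl⟩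
    · rw [if_neg hj]
      rcases List.mem_cons.mp hi with hij | hmem
      · exact absurd (hij ▸ hc) hj
      · exact ih hmem

theorem pv_posScan_complete (line l r : String) (hg : pvGood line l r) :
    ∃ p, pvPosScan line (PySem.List.pyRange 1 (PySem.Str.len line) 1) = some p := by
  obtain ⟨hkl, hkr, he⟩ := hg
  have hlne : l.toList ≠ [] := pv_known_ne l hkl
  have hrne : r.toList ≠ [] := pv_known_ne r hkr
  have hlen : line.toList.length = l.toList.length + r.toList.length := by
    rw [← he, List.length_append]
  have hmem : (l.toList.length : Int) ∈ PySem.List.pyRange 1 (PySem.Str.len line) 1 := by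
    rw [PySem.List.mem_pyRange_one]
    constructor
    · exact_mod_cast Nat.one_le_iff_ne_zero.mpr (fun h => hlne (List.eq_nil_of_length_eq_zero h))
    · rw [PySem.Str.len_eq, hlen]
      have : 0 < r.toList.length := List.length_pos_iff.mpr hrne
      exact_mod_cast Nat.lt_add_of_pos_right this
  apply pv_posScan_mem line _ _ hmem
  have h1 : PySem.Str.slice line none (some (l.toList.length : Int)) = l := by
    apply String.toList_inj.mp
    rw [PySem.Str.toList_slice, PySem.Chars.slice_eq_listSlice]
    rw [PySem.List.slice_to line.toList (by positivity)]
    rw [Int.toNat_natCast, ← he, List.take_left]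
  have h2 : PySem.Str.slice line (some (l.toList.length : Int)) none = r := by
    apply String.toList_inj.mp
    rw [PySem.Str.toList_slice, PySem.Chars.slice_eq_listSlice,
      PySem.List.slice_from_natCast, ← he, List.drop_left]
  rw [h1, h2]
  exact Bool.and_eq_true_iff.mpr ⟨(pv_contains_iff l).mpr hkl, (pv_contains_iff r).mpr hkr⟩

-- the two scans agree: A's scan over the known list = B's scan over the cut positions
theorem pv_scan_eq (line : String) :
    pvFindSplit pvKnown line = pvPosScan line (PySem.List.pyRange 1 (PySem.Str.len line) 1) := by
  have hpos0 : ∀ i ∈ PySem.List.pyRange 1 (PySem.Str.len line) 1, (0:Int) ≤ i := by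
    intro i hi
    have := (PySem.List.mem_pyRange_one.mp hi).1
    omega
  cases h1 : pvFindSplit pvKnown line with
  | some p =>
    obtain ⟨l, r⟩ := p
    have hg := pv_findSplit_sound pvKnown (fun x hx => hx) line l r h1
    cases h2 : pvPosScan line (PySem.List.pyRange 1 (PySem.Str.len line) 1) with
    | some q =>
      obtain ⟨l2, r2⟩ := q
      have hg2 := pv_posScan_sound _ hpos0 line l2 r2 h2
      obtain ⟨e1, e2⟩ := pv_good_unique hg hg2
      rw [e1, e2]
    | none =>
      obtain ⟨p, hp⟩ := pv_posScan_complete line l r hg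
      rw [hp] at h2
      cases h2
  | none =>
    cases h2 : pvPosScan line (PySem.List.pyRange 1 (PySem.Str.len line) 1) with
    | none => rfl
    | some q =>
      obtain ⟨l2, r2⟩ := q
      have hg2 := pv_posScan_sound _ hpos0 line l2 r2 h2
      obtain ⟨p, hp⟩ := pv_findSplit_complete pvKnown line l2 r2 hg2 hg2.1
      rw [hp] at h1
      cases h1

-- A-side expansion of one stripped line, with its split flag
def pvExpand (line : String) : List String × Bool :=
  if pvKnownSet.contains line then ([line], false)
  else
    match pvFindSplit pvKnown line with
    | some (l, r) => ([l, r], true)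
    | none => ([line], false)

-- A's per-line expansion is B's, and the split flag is 'the group has two elements'
theorem pv_expand_eq (line : String) :
    pvExpand line = (pvExpandB line, (pvExpandB line).length == 2) := by
  simp only [pvExpand, pvExpandB, pv_scan_eq]
  by_cases hc : pvKnownSet.contains line = true
  · rw [if_pos hc, if_pos hc]; rfl
  · rw [if_neg hc, if_neg hc]
    cases pvPosScan line (PySem.List.pyRange 1 (PySem.Str.len line) 1) with
    | none => rfl
    | some p => obtain ⟨l, r⟩ := p; rfl

theorem pv_astep_empty (raw : String) (h : PySem.Str.strip raw = "")
    (st : List String × Bool) : pvAStep st raw = st := by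
  simp only [pvAStep]
  rw [if_pos h]

theorem pv_astep_expand (out : List String) (c : Bool) (raw : String)
    (h : ¬ PySem.Str.strip raw = "") :
    pvAStep (out, c) raw =
      (out ++ (pvExpand (PySem.Str.strip raw)).1, c || (pvExpand (PySem.Str.strip raw)).2) := by
  simp only [pvAStep, pvExpand]
  rw [if_neg h]
  by_cases h1 : pvKnownSet.contains (PySem.Str.strip raw) = true
  · rw [if_pos h1, if_pos h1]
    simp only [Bool.or_false]
  · rw [if_neg h1, if_neg h1]
    cases hfs : pvFindSplit pvKnown (PySem.Str.strip raw) with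
    | none => simp only [Bool.or_false]
    | some p => obtain ⟨l, r⟩ := p; simp only [Bool.or_true]

-- A's first loop builds the flattened expansions; its flag is 'some group has two elements'
theorem pv_aloop (lines : List String) : ∀ (st : List String) (c : Bool),
    lines.foldl pvAStep (st, c) =
      (st ++ ((lines.filterMap (fun ln => let s := PySem.Str.strip ln; if s = "" then none else some s)).map pvExpandB).flatten,
       c || ((lines.filterMap (fun ln => let s := PySem.Str.strip ln; if s = "" then none else some s)).map pvExpandB).any (fun g => g.length == 2)) := by
  induction lines with
  | nil => intro st c; simp
  | cons raw rest ih =>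
    intro st c
    rw [List.foldl_cons, List.filterMap_cons]
    by_cases h0 : PySem.Str.strip raw = ""
    · rw [pv_astep_empty raw h0]
      simp only [h0]
      exact ih st c
    · rw [pv_astep_expand st c raw h0, pv_expand_eq]
      simp only [if_neg h0]
      rw [ih]
      simp [List.append_assoc, Bool.or_assoc]

-- A's dedupe fold builds exactly list(dict.fromkeys(flat)) (invariant: the seen-set and the
-- output list hold the same elements)
theorem pv_dedup_list : ∀ (rest : List String) (d : List String) (s : PySem.Set String) (c : Bool),
    (∀ x, PySem.Set.contains s x = d.contains x) →
    (rest.foldl pvDedupStep (d, s, c)).1 = rest.foldl PySem.Set.add d := by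
  intro rest
  induction rest with
  | nil => intro d s c _; rfl
  | cons a t ih =>
    intro d s c hs
    rw [List.foldl_cons, List.foldl_cons]
    by_cases hc : PySem.Set.contains s a = true
    · have hd : d.contains a = true := by rw [← hs]; exact hc
      have hstep : pvDedupStep (d, s, c) a = (d, s, c || pvKnownSet.contains a) := by
        simp only [pvDedupStep]; rw [if_pos hc]
      have hadd : PySem.Set.add d a = d := by
        simp only [PySem.Set.add]
        rw [if_pos (show PySem.Set.contains d a = true from hd)]
      rw [hstep, hadd]
      exact ih d s _ hs
    · have hd : d.contains a = false := Bool.eq_false_iff.mpr (fun h => hc (by rw [hs]; exact h))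
      have hstep : pvDedupStep (d, s, c) a = (d ++ [a], PySem.Set.add s a, c) := by
        simp only [pvDedupStep]; rw [if_neg hc]
      have hadd : PySem.Set.add d a = d ++ [a] := by
        simp only [PySem.Set.add]
        rw [if_neg (show ¬ PySem.Set.contains d a = true by
          rw [show PySem.Set.contains d a = List.contains d a from rfl, hd]; simp)]
      rw [hstep, hadd]
      apply ih
      intro x
      have h1 : PySem.Set.contains (PySem.Set.add s a) x = List.contains (s ++ [a] : List String) x := by
        have : PySem.Set.add s a = s ++ [a] := by simp only [PySem.Set.add]; rw [if_neg hc]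
        rw [← this]; rfl
      rw [h1, List.contains_append, List.contains_append]
      have h2 : PySem.Set.contains s x = List.contains (s : List String) x := rfl
      rw [← h2, hs x]

-- counting a repeat through one more element
theorem pv_count_cons (app a : String) (t : List String) :
    (1 < PySem.List.count (a :: t) app) ↔ ((app = a ∧ app ∈ t) ∨ 1 < PySem.List.count t app) := by
  simp only [PySem.List.count]
  by_cases hax : app = a
  · subst hax
    rw [List.count_cons_self]
    constructor
    · intro h
      by_cases hm : app ∈ t
      · exact Or.inl ⟨rfl, hm⟩
      · have := List.count_eq_zero.mpr hm
        omega
    · rintro (⟨_, hm⟩ | h)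
      · have := List.count_pos_iff.mpr hm
        omega
      · omega
  · rw [List.count_cons_of_ne (Ne.symm hax)]
    simp [hax]

-- A's changed flag from the dedupe loop = 'some known app is repeated' (B counts instead)
theorem pv_flag : ∀ (rest : List String) (d : List String) (s : PySem.Set String) (c : Bool),
    (rest.foldl pvDedupStep (d, s, c)).2.2 =
      (c || pvKnownSet.any (fun app => PySem.Set.contains s app && rest.contains app)
         || pvKnownSet.any (fun app => decide (1 < PySem.List.count rest app))) := by
  intro rest
  induction rest with
  | nil => intro d s c; simp [PySem.List.count]
  | cons a t ih =>
    intro d s c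
    rw [List.foldl_cons]
    have hKmem : ∀ y : String, pvKnownSet.contains y = true ↔ y ∈ (pvKnownSet : List String) := by
      intro y
      rw [show PySem.Set.contains pvKnownSet y = List.contains pvKnownSet y from rfl,
        List.contains_iff_mem]
    by_cases hc : PySem.Set.contains s a = true
    · have hstep : pvDedupStep (d, s, c) a = (d, s, c || pvKnownSet.contains a) := by
        simp only [pvDedupStep]; rw [if_pos hc]
      rw [hstep, ih]
      rw [Bool.eq_iff_iff]
      simp only [Bool.or_eq_true, List.any_eq_true, Bool.and_eq_true, decide_eq_true_eq,
        List.contains_iff_mem, List.mem_cons, pv_count_cons]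
      constructor
      · rintro (((hcc | hk) | ⟨app, hm, h1, h2⟩) | ⟨app, hm, hcnt⟩)
        · exact Or.inl (Or.inl hcc)
        · exact Or.inl (Or.inr ⟨a, (hKmem a).mp hk, hc, Or.inl rfl⟩)
        · exact Or.inl (Or.inr ⟨app, hm, h1, Or.inr h2⟩)
        · exact Or.inr ⟨app, hm, Or.inr hcnt⟩
      · rintro ((hcc | ⟨app, hm, h1, (rfl | h2)⟩) | ⟨app, hm, (⟨rfl, hmt⟩ | hcnt)⟩)
        · exact Or.inl (Or.inl (Or.inl hcc))
        · exact Or.inl (Or.inl (Or.inr ((hKmem app).mpr hm)))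
        · exact Or.inl (Or.inr ⟨app, hm, h1, h2⟩)
        · exact Or.inl (Or.inr ⟨app, hm, hc, hmt⟩)
        · exact Or.inr ⟨app, hm, hcnt⟩
    · have hstep : pvDedupStep (d, s, c) a = (d ++ [a], PySem.Set.add s a, c) := by
        simp only [pvDedupStep]; rw [if_neg hc]
      rw [hstep, ih]
      rw [Bool.eq_iff_iff]
      have hmemadd : ∀ x, (PySem.Set.contains (PySem.Set.add s a) x = true) ↔
          (PySem.Set.contains s x = true ∨ x = a) := by
        intro x
        have hadd : PySem.Set.add s a = s ++ [a] := by
          simp only [PySem.Set.add]; rw [if_neg hc]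
        have h1 : PySem.Set.contains (PySem.Set.add s a) x = List.contains (s ++ [a] : List String) x := by
          rw [← hadd]; rfl
        rw [h1, List.contains_append]
        simp
      simp only [Bool.or_eq_true, List.any_eq_true, Bool.and_eq_true, decide_eq_true_eq,
        List.contains_iff_mem, List.mem_cons, pv_count_cons, hmemadd]
      constructor
      · rintro ((hcc | ⟨app, hm, (h1 | rfl), h2⟩) | ⟨app, hm, hcnt⟩)
        · exact Or.inl (Or.inl hcc)
        · exact Or.inl (Or.inr ⟨app, hm, h1, Or.inr h2⟩)
        · exact Or.inr ⟨app, hm, Or.inl ⟨rfl, h2⟩⟩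
        · exact Or.inr ⟨app, hm, Or.inr hcnt⟩
      · rintro ((hcc | ⟨app, hm, h1, (rfl | h2)⟩) | ⟨app, hm, (⟨rfl, hmt⟩ | hcnt)⟩)
        · exact Or.inl (Or.inl hcc)
        · exact absurd h1 hc
        · exact Or.inl (Or.inr ⟨app, hm, Or.inl h1, h2⟩)
        · exact Or.inl (Or.inr ⟨app, hm, Or.inr rfl, hmt⟩)
        · exact Or.inr ⟨app, hm, hcnt⟩

-- ===== VERDICT (by name: the statement is the Claim_ definition above) =====
theorem repair_apps_txt_entries_py_spec : Claim_equal_repair_apps_txt_entries_py := by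
  intro lines _
  simp only [Spec_repair_apps_txt_entries_py, repair_apps_txt_entries_py,
    repair_apps_txt_entries_py_alt]
  rw [pv_aloop lines [] false]
  simp only [List.nil_append, Bool.false_or]
  rw [pv_flag _ [] PySem.Set.empty _,
    pv_dedup_list _ [] PySem.Set.empty _ (fun x => rfl),
    ← PySem.Set.ofList_eq_foldl, ← PySem.List.dedup_eq_ofList]
  have hset : (pvKnownSet.any (fun app =>
      PySem.Set.contains PySem.Set.empty app && List.contains
        (((lines.filterMap (fun ln => let s := PySem.Str.strip ln; if s = "" then none else some s)).map pvExpandB).flatten) app)) = false := by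
    simp [PySem.Set.contains, PySem.Set.empty]
  rw [hset, Bool.or_false]
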